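-- pv_equiv track=rewrite | github.com/ghsrg/bpm_prediction | src/application/services/bpmn_structure_parser_service.py | _ordered_edges
-- ===== SOURCE A (Python) =====
-- from typing import Any, Dict, Iterable, List, Optional, Tuple
--
-- def _ordered_edges(edges: List[Dict[str, Any]]) -> List[Dict[str, Any]]:
--     dedup: Dict[Tuple[str, str, str, str], Dict[str, Any]] = {}
--     for edge in edges:
--         source = str(edge.get("source", "")).strip()
--         target = str(edge.get("target", "")).strip()
--         if not source or not target:
--             continue
--         edge_type = str(edge.get("edge_type", "sequence")).strip() or "sequence"
--         edge_id = str(edge.get("id", "")).strip() or f"{edge_type}::{source}->{target}"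
--         item = dict(edge)
--         item["source"] = source
--         item["target"] = target
--         item["edge_type"] = edge_type
--         item["id"] = edge_id
--         dedup[(source, target, edge_type, edge_id)] = item
--     ordered = list(dedup.values())
--     ordered.sort(
--         key=lambda item: (
--             str(item.get("source", "")),
--             str(item.get("target", "")),
--             str(item.get("edge_type", "")),
--             str(item.get("id", "")),
--         )
--     )
--     return ordered
-- ===== SOURCE B (Python) =====
-- def _normalize(edge):
--     """Return ((source, target, edge_type, id), normalized item) or None to skip."""
--     source = str(edge.get("source", "")).strip()
--     target = str(edge.get("target", "")).strip()
--     if not source or not target: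
--         return None
--     edge_type = str(edge.get("edge_type", "sequence")).strip() or "sequence"
--     edge_id = str(edge.get("id", "")).strip() or f"{edge_type}::{source}->{target}"
--     item = dict(edge)
--     item["source"] = source
--     item["target"] = target
--     item["edge_type"] = edge_type
--     item["id"] = edge_id
--     return (source, target, edge_type, edge_id), item
--
--
-- def _ordered_edges(edges):
--     keyed = [kv for kv in map(_normalize, edges) if kv is not None]
--     keyed.sort(key=lambda kv: kv[0])
--     result = []
--     prev_key = None
--     for key, item in keyed:
--         if key == prev_key:
--             result[-1] = item  # later duplicate wins (stable sort keeps input order)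
--         else:
--             result.append(item)
--             prev_key = key
--     return result
-- ===== Notes on version B (the rewrite author's own statement) =====
-- stated objective: alternative
-- what changed: Replaces A's last-wins dict dedup followed by a sort with sort-first-then-collapse: normalize every edge into a (key, item) list, stably sort it by the (source, target, edge_type, id) key, then one adjacent pass that overwrites the last result slot on an equal-key run, so the last occurrence of each key survives without any dict or set.
import Mathlib
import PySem

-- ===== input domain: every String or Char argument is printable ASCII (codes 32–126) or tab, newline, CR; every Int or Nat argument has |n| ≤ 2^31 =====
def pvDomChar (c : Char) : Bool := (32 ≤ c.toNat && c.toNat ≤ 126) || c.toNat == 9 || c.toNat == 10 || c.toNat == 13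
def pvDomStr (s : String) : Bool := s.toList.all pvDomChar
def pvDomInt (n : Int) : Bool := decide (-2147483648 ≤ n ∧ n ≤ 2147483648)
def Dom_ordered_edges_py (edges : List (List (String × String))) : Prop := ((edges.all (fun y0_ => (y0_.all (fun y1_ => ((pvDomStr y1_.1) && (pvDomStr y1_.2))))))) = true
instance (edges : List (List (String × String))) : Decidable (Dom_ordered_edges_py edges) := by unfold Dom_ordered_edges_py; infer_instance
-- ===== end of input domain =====

-- B replaces A's last-wins dict dedup + sort by sort-first-then-collapse: normalize
-- into a (key, item) list, stably sort it by the 4-string key, then one adjacent pass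
-- that overwrites the last result slot on an equal-key run (so the last occurrence of
-- each key survives), with no dict or set.

abbrev EKey := String × String × String × String

abbrev LexKey := Lex (Lex (String × String) × Lex (String × String))

-- Python's 4-string tuple order, modelled as nested lexicographic pairs
def lexOf (k : EKey) : LexKey := toLex (toLex (k.1, k.2.1), toLex (k.2.2.1, k.2.2.2))

-- ===== PORT A =====
def ordered_edges_py (edges : List (List (String × String))) : List (List (String × String)) :=
  let dedup : PySem.Dict EKey (PySem.Dict String String) :=
    edges.foldl (fun dedup edge =>
      let e := PySem.Dict.ofList edge
      let source := PySem.Str.strip (e.getD "source" "")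
      let target := PySem.Str.strip (e.getD "target" "")
      if source = "" ∨ target = "" then dedup
      else
        let et := PySem.Str.strip (e.getD "edge_type" "sequence")
        let edge_type := if et = "" then "sequence" else et
        let ei := PySem.Str.strip (e.getD "id" "")
        let edge_id := if ei = "" then edge_type ++ "::" ++ source ++ "->" ++ target else ei
        let item := (((e.insert "source" source).insert "target" target).insert
                      "edge_type" edge_type).insert "id" edge_id
        dedup.insert (source, target, edge_type, edge_id) item) PySem.Dict.empty
  let ordered := dedup.values
  let sortedItems := PySem.List.sorted2 ordered
    (fun item => (toLex (item.getD "source" "", item.getD "target" "") : Lex (String × String)))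
    (fun item => (toLex (item.getD "edge_type" "", item.getD "id" "") : Lex (String × String))) false
  sortedItems.map (fun d => d.items)

-- ===== PORT B =====
-- B-side helper: port of _normalize (None = skip)
def normEdgeB (edge : List (String × String)) : Option (EKey × PySem.Dict String String) :=
  let e := PySem.Dict.ofList edge
  let source := PySem.Str.strip (e.getD "source" "")
  let target := PySem.Str.strip (e.getD "target" "")
  if source = "" ∨ target = "" then none
  else
    let et := PySem.Str.strip (e.getD "edge_type" "sequence")
    let edge_type := if et = "" then "sequence" else et
    let ei := PySem.Str.strip (e.getD "id" "")
    let edge_id := if ei = "" then edge_type ++ "::" ++ source ++ "->" ++ target else ei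
    some ((source, target, edge_type, edge_id),
      (((e.insert "source" source).insert "target" target).insert
        "edge_type" edge_type).insert "id" edge_id)

def ordered_edges_py_alt (edges : List (List (String × String))) : List (List (String × String)) :=
  let keyed := edges.filterMap normEdgeB
  let sortedKeyed := PySem.List.sorted keyed (fun kv => lexOf kv.1) false
  -- adjacent collapse: 'result[-1] = item' is dropLast ++ [item] (result is nonempty
  -- whenever prev_key is not None, so the Python index -1 never raises)
  let st := sortedKeyed.foldl
    (fun (st : List (PySem.Dict String String) × Option EKey) kv =>
      if st.2 = some kv.1 then (st.1.dropLast ++ [kv.2], st.2)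
      else (st.1 ++ [kv.2], some kv.1)) ([], none)
  st.1.map (fun d => d.items)

-- ===== PRECONDITION & SPEC =====
def Spec_ordered_edges_py (edges : List (List (String × String))) (out : List (List (String × String))) : Prop := out = ordered_edges_py_alt edges
instance (edges : List (List (String × String))) (out : List (List (String × String))) : Decidable (Spec_ordered_edges_py edges out) := by unfold Spec_ordered_edges_py; infer_instance

-- ===== CLAIM (what is proved, stated in full; the proofs are below) =====
def Claim_equal_ordered_edges_py : Prop := ∀ (edges : List (List (String × String))), Dom_ordered_edges_py edges → Spec_ordered_edges_py edges (ordered_edges_py edges)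

-- ===== LEMMAS AND PROOFS =====

def itemKey (d : PySem.Dict String String) : EKey :=
  (d.getD "source" "", d.getD "target" "", d.getD "edge_type" "", d.getD "id" "")

def sortKey (d : PySem.Dict String String) : LexKey :=
  toLex (toLex (d.getD "source" "", d.getD "target" ""),
         toLex (d.getD "edge_type" "", d.getD "id" ""))

-- A's dict-building loop, on normalized pairs
def insFold (l : List (EKey × PySem.Dict String String)) : PySem.Dict EKey (PySem.Dict String String) :=
  l.foldl (fun d p => d.insert p.1 p.2) PySem.Dict.empty

-- keyed version of B's adjacent collapse (ghost keys for the proof)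
def clpsK : List (EKey × PySem.Dict String String) → List (EKey × PySem.Dict String String)
  | [] => []
  | [a] => [a]
  | a :: b :: t => if a.1 = b.1 then clpsK (b :: t) else a :: clpsK (b :: t)

-- B's fold step
def stepB (st : List (PySem.Dict String String) × Option EKey)
    (kv : EKey × PySem.Dict String String) :
    List (PySem.Dict String String) × Option EKey :=
  if st.2 = some kv.1 then (st.1.dropLast ++ [kv.2], st.2)
  else (st.1 ++ [kv.2], some kv.1)

lemma sorted2_eq_sorted_lex {α κ₁ κ₂ : Type} [LinearOrder κ₁] [LinearOrder κ₂]
    (xs : List α) (k1 : α → κ₁) (k2 : α → κ₂) :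
    PySem.List.sorted2 xs k1 k2 false
      = PySem.List.sorted xs (fun x => (toLex (k1 x, k2 x) : Lex (κ₁ × κ₂))) false := by
  unfold PySem.List.sorted2 PySem.List.sorted
  have hb : (fun a b => decide (k1 a < k1 b) || (!decide (k1 b < k1 a) && decide (k2 a < k2 b)))
      = (fun a b => decide ((toLex (k1 a, k2 a) : Lex (κ₁ × κ₂)) < toLex (k1 b, k2 b))) := by
    funext a b
    rcases lt_trichotomy (k1 a) (k1 b) with h | h | h
    · simp [h, Prod.Lex.toLex_lt_toLex, not_lt.mpr (le_of_lt h)]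
    · simp [h, Prod.Lex.toLex_lt_toLex]
    · simp [h, Prod.Lex.toLex_lt_toLex, not_lt.mpr (le_of_lt h), ne_of_gt h]
  simp only [Bool.false_eq_true, if_false]
  rw [hb]

lemma normEdgeB_itemKey {edge : List (String × String)} {k : EKey} {v : PySem.Dict String String}
    (h : normEdgeB edge = some (k, v)) : itemKey v = k := by
  unfold normEdgeB at h
  dsimp only at h
  split at h
  · exact absurd h (by simp)
  · injection h with h'
    injection h' with hk hv
    subst hk; subst hv
    unfold itemKey
    simp [PySem.Dict.getD_insert_self, PySem.Dict.getD_insert_of_ne]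

lemma foldA_eq (edges : List (List (String × String)))
    (d : PySem.Dict EKey (PySem.Dict String String)) :
    edges.foldl (fun dedup edge =>
      let e := PySem.Dict.ofList edge
      let source := PySem.Str.strip (e.getD "source" "")
      let target := PySem.Str.strip (e.getD "target" "")
      if source = "" ∨ target = "" then dedup
      else
        let et := PySem.Str.strip (e.getD "edge_type" "sequence")
        let edge_type := if et = "" then "sequence" else et
        let ei := PySem.Str.strip (e.getD "id" "")
        let edge_id := if ei = "" then edge_type ++ "::" ++ source ++ "->" ++ target else ei
        let item := (((e.insert "source" source).insert "target" target).insert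
                      "edge_type" edge_type).insert "id" edge_id
        dedup.insert (source, target, edge_type, edge_id) item) d
      = (edges.filterMap normEdgeB).foldl (fun d p => d.insert p.1 p.2) d := by
  induction edges generalizing d with
  | nil => rfl
  | cons edge rest ih =>
    rw [List.foldl_cons, List.filterMap_cons]
    unfold normEdgeB
    dsimp only
    split
    · rw [ih]; rfl
    · rw [List.foldl_cons, ih]; rfl

lemma get?_insFold (l : List (EKey × PySem.Dict String String)) (k : EKey) :
    (insFold l).get? k = l.reverse.lookup k := by
  induction l using List.reverseRecOn with
  | nil => simp [insFold, PySem.Dict.get?_empty]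
  | append_singleton l p ih =>
    unfold insFold at *
    rw [List.foldl_append]
    simp only [List.foldl_cons, List.foldl_nil, List.reverse_append, List.reverse_cons,
      List.reverse_nil, List.nil_append, List.cons_append]
    rw [PySem.Dict.get?_insert]
    rcases p with ⟨pk, pv⟩
    by_cases hk : k = pk
    · simp [hk, List.lookup]
    · have hne : (k == pk) = false := beq_eq_false_iff_ne.mpr hk
      simp [hk, List.lookup, ih, hne]

lemma nodup_keys_insFold (l : List (EKey × PySem.Dict String String)) :
    (insFold l).keys.Nodup := by
  unfold insFold
  exact PySem.Dict.nodup_keys_foldl_insert_key l Prod.fst (fun d p => p.2) PySem.Dict.empty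
    (by simp)


-- generic association-list lookup helpers
lemma lookup_singleton {kappa nu : Type} [BEq kappa] [LawfulBEq kappa] [DecidableEq kappa]
    (k a1 : kappa) (a2 : nu) :
    List.lookup k [(a1, a2)] = if k = a1 then some a2 else none := by
  by_cases h : k = a1
  · simp [List.lookup, h]
  · simp [List.lookup, h, beq_eq_false_iff_ne.mpr h]

lemma lookup_append_some {kappa nu : Type} [BEq kappa] [LawfulBEq kappa]
    {l1 : List (kappa × nu)} (l2 : List (kappa × nu))
    {k : kappa} {v : nu} (h : l1.lookup k = some v) : (l1 ++ l2).lookup k = some v := by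
  induction l1 with
  | nil => simp [List.lookup] at h
  | cons p rest ih =>
    rcases p with ⟨p1, p2⟩
    rw [List.cons_append]
    rcases hb : (k == p1) with _ | _
    · simp only [List.lookup, hb] at h ⊢
      exact ih h
    · simp only [List.lookup, hb] at h ⊢
      exact h

lemma lookup_append_none {kappa nu : Type} [BEq kappa] [LawfulBEq kappa]
    {l1 : List (kappa × nu)} (l2 : List (kappa × nu))
    {k : kappa} (h : l1.lookup k = none) : (l1 ++ l2).lookup k = l2.lookup k := by
  induction l1 with
  | nil => simp
  | cons p rest ih =>
    rcases p with ⟨p1, p2⟩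
    rw [List.cons_append]
    rcases hb : (k == p1) with _ | _
    · simp only [List.lookup, hb] at h ⊢
      exact ih h
    · simp [List.lookup, hb] at h

lemma lookup_eq_none_of_not_mem {kappa nu : Type} [BEq kappa] [LawfulBEq kappa]
    {l : List (kappa × nu)} {k : kappa}
    (h : k ∉ l.map Prod.fst) : l.lookup k = none := by
  induction l with
  | nil => rfl
  | cons p rest ih =>
    rcases p with ⟨p1, p2⟩
    have hk : k ≠ p1 := fun hx => h (by simp [hx])
    simp only [List.lookup, beq_eq_false_iff_ne.mpr hk]
    exact ih (fun hx => h (List.mem_cons_of_mem _ hx))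

lemma lookup_isSome_of_mem {kappa nu : Type} [BEq kappa] [LawfulBEq kappa]
    {l : List (kappa × nu)} {k : kappa}
    (h : k ∈ l.map Prod.fst) : ∃ v, l.lookup k = some v := by
  induction l with
  | nil => simp at h
  | cons p rest ih =>
    rcases p with ⟨p1, p2⟩
    rcases hb : (k == p1) with _ | _
    · simp only [List.lookup, hb]
      have h' : k = p1 ∨ k ∈ List.map Prod.fst rest := by simpa using h
      rcases h' with hx | hx
      · exact absurd (beq_iff_eq.mpr hx) (by simp [hb])
      · exact ih hx
    · exact ⟨p2, by simp [List.lookup, hb]⟩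

lemma lookup_eq_lookup_filter {kappa nu : Type} [BEq kappa] [LawfulBEq kappa] [DecidableEq kappa]
    (l : List (kappa × nu)) (k : kappa) :
    l.lookup k = (l.filter (fun p => decide (p.1 = k))).lookup k := by
  induction l with
  | nil => rfl
  | cons p rest ih =>
    rcases p with ⟨p1, p2⟩
    rw [List.filter_cons]
    by_cases hk : p1 = k
    · subst hk
      simp [List.lookup]
    · have hne : (k == p1) = false := beq_eq_false_iff_ne.mpr (fun hx => hk hx.symm)
      simp only [decide_eq_true_eq, hk, if_false]
      simp only [List.lookup, hne]
      exact ih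

-- stability of PySem's insertion sort, as preservation of equal-key filters
lemma filter_insertBy_eq_key {alpha kappa : Type} [LinearOrder kappa] (key : alpha → kappa) (x : alpha) (ys : List alpha)
    (hys : ys.Pairwise (fun a b => key a ≤ key b)) :
    (PySem.List.insertBy (fun a b => decide (key a < key b)) x ys).filter
        (fun a => decide (key a = key x))
      = ys.filter (fun a => decide (key a = key x)) ++ [x] := by
  induction ys with
  | nil => simp [PySem.List.insertBy]
  | cons y ys ih =>
    rw [List.pairwise_cons] at hys
    unfold PySem.List.insertBy
    by_cases h : key x < key y
    · simp only [h, decide_true, if_true]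
      have hall : ∀ z ∈ y :: ys, key z ≠ key x := by
        intro z hz
        rcases List.mem_cons.mp hz with hz | hz
        · subst hz; exact ne_of_gt h
        · exact ne_of_gt (lt_of_lt_of_le h (hys.1 z hz))
      have hally : decide (key y = key x) = false := by
        simp [hall y List.mem_cons_self]
      have hfilt' : ys.filter (fun a => decide (key a = key x)) = [] := by
        rw [List.filter_eq_nil_iff]
        intro z hz
        simp [hall z (List.mem_cons_of_mem _ hz)]
      simp [hally, hfilt']
    · simp only [h, decide_false, Bool.false_eq_true, if_false]
      rw [List.filter_cons, List.filter_cons]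
      by_cases hy : key y = key x
      · simp only [hy, decide_true, if_true]
        rw [ih hys.2]
        rfl
      · simp only [hy, decide_false, Bool.false_eq_true, if_false]
        exact ih hys.2

lemma filter_insertBy_ne_key {alpha kappa : Type} [LinearOrder kappa] (key : alpha → kappa) (x : alpha) (ys : List alpha)
    (k : kappa) (hk : key x ≠ k) :
    (PySem.List.insertBy (fun a b => decide (key a < key b)) x ys).filter
        (fun a => decide (key a = k))
      = ys.filter (fun a => decide (key a = k)) := by
  induction ys with
  | nil => simp [PySem.List.insertBy, hk]
  | cons y ys ih =>
    unfold PySem.List.insertBy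
    by_cases h : key x < key y
    · simp [h, List.filter_cons, hk]
    · simp only [h, decide_false, Bool.false_eq_true, if_false]
      rw [List.filter_cons, List.filter_cons, ih]

lemma filter_sorted_key {alpha kappa : Type} [LinearOrder kappa] (l : List alpha) (key : alpha → kappa) (k : kappa) :
    (PySem.List.sorted l key false).filter (fun a => decide (key a = k))
      = l.filter (fun a => decide (key a = k)) := by
  induction l using List.reverseRecOn with
  | nil => rfl
  | append_singleton l x ih =>
    have hrw : PySem.List.sorted (l ++ [x]) key false
        = PySem.List.insertBy (fun a b => decide (key a < key b)) x
            (PySem.List.sorted l key false) := by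
      rw [PySem.List.sorted_eq_foldl_insertBy, PySem.List.sorted_eq_foldl_insertBy,
        List.foldl_append, List.foldl_cons, List.foldl_nil]
    rw [hrw, List.filter_append]
    by_cases hx : key x = k
    · subst hx
      rw [filter_insertBy_eq_key key x _ (PySem.List.sorted_pairwise l key), ih]
      simp
    · rw [filter_insertBy_ne_key key x _ k hx, ih]
      simp [hx]

lemma lexOf_injective : Function.Injective lexOf := by
  rintro ⟨a1, b1, c1, d1⟩ ⟨a2, b2, c2, d2⟩ h
  unfold lexOf at h
  have h' := toLex.injective h
  have h1 := toLex.injective (congrArg Prod.fst h')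
  have h2 := toLex.injective (congrArg Prod.snd h')
  injection h1 with ha hb
  injection h2 with hc hd
  simp_all

-- the stable sort preserves each key's last occurrence
lemma reverse_lookup_sorted (l : List (EKey × PySem.Dict String String)) (k : EKey) :
    (PySem.List.sorted l (fun kv => lexOf kv.1) false).reverse.lookup k
      = l.reverse.lookup k := by
  have hpred : (fun p : EKey × PySem.Dict String String => decide (p.1 = k))
      = (fun p : EKey × PySem.Dict String String => decide (lexOf p.1 = lexOf k)) := by
    funext p
    by_cases h : p.1 = k
    · simp [h]
    · have h2 : ¬ lexOf p.1 = lexOf k := fun hx => h (lexOf_injective hx)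
      simp [h, h2]
  rw [lookup_eq_lookup_filter, lookup_eq_lookup_filter l.reverse k,
    List.filter_reverse, List.filter_reverse, hpred,
    filter_sorted_key l (fun kv => lexOf kv.1) (lexOf k)]

lemma clpsK_cons_eq (a b : EKey × PySem.Dict String String)
    (t : List (EKey × PySem.Dict String String)) (h : a.1 = b.1) :
    clpsK (a :: b :: t) = clpsK (b :: t) := by
  rw [clpsK, if_pos h]

lemma clpsK_cons_ne (a b : EKey × PySem.Dict String String)
    (t : List (EKey × PySem.Dict String String)) (h : ¬ a.1 = b.1) :
    clpsK (a :: b :: t) = a :: clpsK (b :: t) := by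
  rw [clpsK, if_neg h]

lemma mem_clpsK_sub {s : List (EKey × PySem.Dict String String)}
    {p : EKey × PySem.Dict String String} (h : p ∈ clpsK s) : p ∈ s := by
  induction s with
  | nil => simp [clpsK] at h
  | cons a t ih =>
    cases t with
    | nil => simpa [clpsK] using h
    | cons b t' =>
      unfold clpsK at h
      split at h
      · exact List.mem_cons_of_mem _ (ih h)
      · rcases List.mem_cons.mp h with hx | hx
        · exact hx ▸ List.mem_cons_self
        · exact List.mem_cons_of_mem _ (ih hx)

lemma clpsK_pairwise {s : List (EKey × PySem.Dict String String)}
    (hs : s.Pairwise (fun a b => lexOf a.1 ≤ lexOf b.1)) :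
    (clpsK s).Pairwise (fun a b => lexOf a.1 < lexOf b.1) := by
  induction s with
  | nil => simp [clpsK]
  | cons a t ih =>
    cases t with
    | nil => simp [clpsK]
    | cons b t' =>
      rw [List.pairwise_cons] at hs
      unfold clpsK
      split
      · exact ih hs.2
      · rename_i hne
        rw [List.pairwise_cons]
        refine ⟨?_, ih hs.2⟩
        intro x hx
        have hxmem : x ∈ b :: t' := mem_clpsK_sub hx
        have hab : lexOf a.1 < lexOf b.1 :=
          lt_of_le_of_ne (hs.1 b List.mem_cons_self) (fun hx' => hne (lexOf_injective hx'))
        rcases List.mem_cons.mp hxmem with hx' | hx'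
        · exact hx' ▸ hab
        · rw [List.pairwise_cons] at hs
          exact lt_of_lt_of_le hab ((hs.2.1) x hx')

lemma mem_clpsK {s : List (EKey × PySem.Dict String String)}
    (hs : s.Pairwise (fun a b => lexOf a.1 ≤ lexOf b.1)) (k : EKey)
    (v : PySem.Dict String String) :
    ((k, v) ∈ clpsK s ↔ s.reverse.lookup k = some v) := by
  induction s with
  | nil => simp [clpsK]
  | cons a t ih =>
    cases t with
    | nil =>
      rcases a with ⟨a1, a2⟩
      simp only [clpsK, List.mem_singleton, List.reverse_cons, List.reverse_nil,
        List.nil_append, lookup_singleton, Prod.mk.injEq]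
      by_cases hk : k = a1
      · simp [hk, eq_comm]
      · simp [hk]
    | cons b t' =>
      rw [List.pairwise_cons] at hs
      have hrev : (a :: b :: t').reverse = (b :: t').reverse ++ [a] := by
        rw [List.reverse_cons]
      rcases a with ⟨a1, a2⟩
      by_cases heq : a1 = b.1
      · rw [clpsK_cons_eq _ _ _ heq]
        rw [ih hs.2, hrev]
        rcases hl : List.lookup k ((b :: t').reverse) with _ | w
        · have hk : k ≠ a1 := by
            intro hx
            have hmem : k ∈ ((b :: t').reverse).map Prod.fst := by
              rw [List.map_reverse, List.mem_reverse]
              exact List.mem_map.mpr ⟨b, List.mem_cons_self, (heq ▸ hx).symm⟩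
            rcases lookup_isSome_of_mem hmem with ⟨w, hw⟩
            rw [hw] at hl; exact absurd hl (by simp)
          rw [lookup_append_none _ hl, lookup_singleton, if_neg hk]
        · rw [lookup_append_some _ hl]
      · have hstrict : ∀ x ∈ b :: t', lexOf a1 < lexOf x.1 := by
          intro x hx
          have hab : lexOf a1 < lexOf b.1 :=
            lt_of_le_of_ne (hs.1 b List.mem_cons_self) (fun hx' => heq (lexOf_injective hx'))
          rcases List.mem_cons.mp hx with hx' | hx'
          · exact hx' ▸ hab
          · rw [List.pairwise_cons] at hs
            exact lt_of_lt_of_le hab ((hs.2.1) x hx')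
        rw [clpsK_cons_ne _ _ _ heq]
        rw [hrev, List.mem_cons, ih hs.2]
        by_cases hk : k = a1
        · have hnm : k ∉ ((b :: t').reverse).map Prod.fst := by
            rw [List.map_reverse, List.mem_reverse]
            intro hmem
            rcases List.mem_map.mp hmem with ⟨x, hx, hx1⟩
            exact absurd (congrArg lexOf (hk.symm.trans hx1.symm))
              (ne_of_lt (hstrict x hx))
          have hl : List.lookup k ((b :: t').reverse) = none :=
            lookup_eq_none_of_not_mem hnm
          rw [lookup_append_none _ hl, lookup_singleton, if_pos hk, hl]
          simp [Prod.mk.injEq, hk, eq_comm]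
        · rcases hl : List.lookup k ((b :: t').reverse) with _ | w
          · rw [lookup_append_none _ hl, lookup_singleton, if_neg hk]
            simp [Prod.mk.injEq, hk]
          · rw [lookup_append_some _ hl]
            simp [Prod.mk.injEq, hk]

lemma foldB_go (t : List (EKey × PySem.Dict String String))
    (a : EKey × PySem.Dict String String) (acc : List (PySem.Dict String String)) :
    (t.foldl stepB (acc ++ [a.2], some a.1)).1 = acc ++ (clpsK (a :: t)).map Prod.snd := by
  induction t generalizing a acc with
  | nil => simp [clpsK]
  | cons b t' ih =>
    rw [List.foldl_cons]
    by_cases h : a.1 = b.1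
    · have hstep : stepB (acc ++ [a.2], some a.1) b = (acc ++ [b.2], some b.1) := by
        unfold stepB
        rw [if_pos (by rw [h])]
        dsimp only
        rw [List.dropLast_concat, h]
      rw [hstep, ih b acc, clpsK_cons_eq _ _ _ h]
    · have hstep : stepB (acc ++ [a.2], some a.1) b = ((acc ++ [a.2]) ++ [b.2], some b.1) := by
        unfold stepB
        rw [if_neg (by simp [h])]
      rw [hstep, ih b (acc ++ [a.2]), clpsK_cons_ne _ _ _ h]
      rw [List.map_cons, List.append_assoc]
      rfl

lemma foldB_top (s : List (EKey × PySem.Dict String String)) :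
    (s.foldl stepB ([], none)).1 = (clpsK s).map Prod.snd := by
  cases s with
  | nil => rfl
  | cons a t =>
    rw [List.foldl_cons]
    have h : stepB ([], none) a = ([] ++ [a.2], some a.1) := by
      unfold stepB
      rw [if_neg (by simp)]
    rw [h, foldB_go t a []]
    rfl

-- the central equality of the two programs' outputs
lemma main_eq (edges : List (List (String × String))) :
    ordered_edges_py edges = ordered_edges_py_alt edges := by
  unfold ordered_edges_py ordered_edges_py_alt
  dsimp only
  have hstepB : (fun (st : List (PySem.Dict String String) × Option EKey)
      (kv : EKey × PySem.Dict String String) =>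
      if st.2 = some kv.1 then (st.1.dropLast ++ [kv.2], st.2)
      else (st.1 ++ [kv.2], some kv.1)) = stepB := rfl
  rw [foldA_eq edges PySem.Dict.empty, hstepB, foldB_top]
  set l := edges.filterMap normEdgeB with hl
  set D := l.foldl (fun d p => d.insert p.1 p.2) PySem.Dict.empty with hD
  set s := PySem.List.sorted l (fun kv => lexOf kv.1) false with hsdef
  rw [sorted2_eq_sorted_lex]
  have hs : s.Pairwise (fun a b => lexOf a.1 ≤ lexOf b.1) :=
    PySem.List.sorted_pairwise l (fun kv => lexOf kv.1)
  -- every pair of l (hence of s, hence of clpsK s) has itemKey snd = fst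
  have hkey : ∀ p ∈ s, itemKey p.2 = p.1 := by
    intro p hp
    have hpl : p ∈ l := (PySem.List.mem_sorted _ _ _ _).mp hp
    rcases List.mem_filterMap.mp (hl ▸ hpl) with ⟨e, _, he⟩
    rcases p with ⟨k, v⟩
    exact normEdgeB_itemKey he
  -- membership characterisations
  have hDins : D = insFold l := rfl
  have hmemD : ∀ k v, (k, v) ∈ D.items ↔ l.reverse.lookup k = some v := by
    intro k v
    rw [hDins, ← get?_insFold l k]
    exact (PySem.Dict.get?_eq_some_iff_mem_items (insFold l) k v (nodup_keys_insFold l)).symm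
  have hmemC : ∀ k v, (k, v) ∈ clpsK s ↔ l.reverse.lookup k = some v := by
    intro k v
    rw [mem_clpsK hs k v, hsdef, reverse_lookup_sorted]
  -- nodup on both sides
  have hpwC : (clpsK s).Pairwise (fun a b => lexOf a.1 < lexOf b.1) := clpsK_pairwise hs
  have hnodupC : (clpsK s).Nodup := by
    unfold List.Nodup
    refine hpwC.imp ?_
    intro a b h hx
    subst hx
    exact lt_irrefl _ h
  have hnodupDk : (D.items.map Prod.fst).Nodup := by
    have := nodup_keys_insFold l
    rw [← hDins] at this
    simpa [PySem.Dict.keys] using this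
  have hperm : (clpsK s).Perm D.items := by
    rw [List.perm_ext_iff_of_nodup hnodupC (hnodupDk.of_map _)]
    rintro ⟨k, v⟩
    rw [hmemC k v, hmemD k v]
  -- pairwise strict sortKey on B's collapsed item list
  have hpwItems : ((clpsK s).map Prod.snd).Pairwise (fun a b => sortKey a < sortKey b) := by
    rw [List.pairwise_map]
    refine hpwC.imp_of_mem ?_
    intro a b ha hb h
    have hka : sortKey a.2 = lexOf a.1 := by
      rw [show sortKey a.2 = lexOf (itemKey a.2) from rfl, hkey a (mem_clpsK_sub ha)]
    have hkb : sortKey b.2 = lexOf b.1 := by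
      rw [show sortKey b.2 = lexOf (itemKey b.2) from rfl, hkey b (mem_clpsK_sub hb)]
    rw [hka, hkb]
    exact h
  -- B's collapsed list is a strictly key-increasing rearrangement of D.values
  have hPermVals : ((clpsK s).map Prod.snd).Perm D.values := by
    have : D.values = D.items.map Prod.snd := rfl
    rw [this]
    exact hperm.map Prod.snd
  have hsk : (fun item : PySem.Dict String String =>
      (toLex (toLex (item.getD "source" "", item.getD "target" ""),
        toLex (item.getD "edge_type" "", item.getD "id" "")) : LexKey)) = sortKey := rfl
  rw [hsk]
  rw [PySem.List.sorted_eq_of_perm_of_pairwise_lt _ _ _ hPermVals hpwItems]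

-- ===== VERDICT (by name: the statement is the Claim_ definition above) =====
theorem ordered_edges_py_spec : Claim_equal_ordered_edges_py := by
  intro edges _
  unfold Spec_ordered_edges_py
  exact main_eq edges
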